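-- pv_equiv track=rewrite | github.com/Pedrochem/CogsDataAug | code/substructure_verbs_pps.py | get_outsplits_word_info
-- ===== SOURCE A (Python) =====
-- def get_outsplits_word_info(outsplits):
--     pos = None
--     found = False
--     for i,x in enumerate(outsplits):
--         if x.isdigit() and not found:
--             pos = int(x)
--             found = True
--         if x == 'AND':
--             ind = i+1
--             return pos,ind,False
--
--     return pos,None,True
-- ===== SOURCE B (Python) =====
-- def get_outsplits_word_info(outsplits):
--     try:
--         ind = outsplits.index('AND') + 1
--     except ValueError:
--         ind = None
--     prefix = outsplits if ind is None else outsplits[:ind-1]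
--     pos = None
--     for x in prefix:
--         if x.isdigit():
--             pos = int(x)
--             break
--     return pos, ind, ind is None
-- ===== Notes on version B (the rewrite author's own statement) =====
-- stated objective: simpler
-- what changed: Replaces A's single fused loop with (pos, found, ind) state and in-loop early return by two targeted passes: list.index finds the AND position first, then a plain scan of the prefix before AND finds the first digit token.
import Mathlib
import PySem

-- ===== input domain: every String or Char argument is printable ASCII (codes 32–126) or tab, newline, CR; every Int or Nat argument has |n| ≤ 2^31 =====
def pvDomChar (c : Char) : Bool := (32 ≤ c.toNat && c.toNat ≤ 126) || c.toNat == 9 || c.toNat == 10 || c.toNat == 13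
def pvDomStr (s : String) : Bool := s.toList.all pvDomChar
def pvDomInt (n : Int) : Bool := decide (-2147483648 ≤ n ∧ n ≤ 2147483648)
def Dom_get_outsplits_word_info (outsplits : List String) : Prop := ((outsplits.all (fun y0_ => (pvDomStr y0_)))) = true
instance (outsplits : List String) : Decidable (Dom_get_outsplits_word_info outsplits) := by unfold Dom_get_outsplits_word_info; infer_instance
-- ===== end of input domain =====

-- B replaces A's fused early-exit state-machine loop by two targeted passes:
-- find the 'AND' index with list.index, then scan only the prefix before it for the first digit token (objective: simpler).

-- ===== PORT A =====
-- the for-loop of A: state (pos, found), index i carried for ind = i+1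
def pvLoopA : List String → Nat → Option Int → Bool → Option Int × Option Int × Bool
  | [], _, pos, _ => (pos, none, true)
  | x :: xs, i, pos, found =>
    let pos' := if PySem.Str.strIsdigit x && !found then PySem.Int.ofStr? x else pos
    let found' := if PySem.Str.strIsdigit x && !found then true else found
    if x == "AND" then (pos', some ((i : Int) + 1), false)
    else pvLoopA xs (i + 1) pos' found'

def get_outsplits_word_info (outsplits : List String) : Option Int × Option Int × Bool :=
  pvLoopA outsplits 0 none false

-- ===== PORT B =====
-- 'for x in prefix: if x.isdigit(): pos = int(x); break' with pos initially None
def pvFirstDigit : List String → Option Int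
  | [] => none
  | x :: xs => if PySem.Str.strIsdigit x then PySem.Int.ofStr? x else pvFirstDigit xs

def get_outsplits_word_info_alt (outsplits : List String) : Option Int × Option Int × Bool :=
  let ind : Option Int := match PySem.List.index? outsplits "AND" with
    | some i => some ((i : Int) + 1)
    | none => none
  let prefixL := match ind with
    | none => outsplits
    | some j => PySem.List.slice outsplits none (some (j - 1))
  (pvFirstDigit prefixL, ind, ind.isNone)

-- ===== PRECONDITION & SPEC =====
def Spec_get_outsplits_word_info (outsplits : List String) (out : Option Int × Option Int × Bool) : Prop := out = get_outsplits_word_info_alt outsplits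
instance (outsplits : List String) (out : Option Int × Option Int × Bool) : Decidable (Spec_get_outsplits_word_info outsplits out) := by unfold Spec_get_outsplits_word_info; infer_instance

-- ===== CLAIM (what is proved, stated in full; the proofs are below) =====
def Claim_equal_get_outsplits_word_info : Prop := ∀ (outsplits : List String), Dom_get_outsplits_word_info outsplits → Spec_get_outsplits_word_info outsplits (get_outsplits_word_info outsplits)

-- ===== LEMMAS AND PROOFS =====

-- pvFirstDigit continued with an untouched tail when the head is a digit already found
theorem pvLoopA_char :
    ∀ (xs : List String) (i : Nat) (pos : Option Int) (found : Bool),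
      pvLoopA xs i pos found =
        match PySem.List.index? xs "AND" with
        | some k =>
            ((if found then pos else
                match (xs.take k).find? PySem.Str.strIsdigit with
                | some x => PySem.Int.ofStr? x
                | none => pos),
              some ((i : Int) + (k : Int) + 1), false)
        | none =>
            ((if found then pos else
                match xs.find? PySem.Str.strIsdigit with
                | some x => PySem.Int.ofStr? x
                | none => pos),
              none, true) := by
  intro xs
  induction xs with
  | nil =>
      intro i pos found
      simp [pvLoopA, PySem.List.index?]
  | cons x xs ih =>
      intro i pos found
      by_cases hAND : x = "AND"
      · subst hAND
        rw [PySem.List.index?_cons_self]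
        simp [pvLoopA]
        intro hcontr
        exact absurd hcontr (by decide)
      · have hidx := PySem.List.index?_cons_of_ne (v := "AND") (xs := xs) hAND
        rw [hidx]
        have hx : (x == "AND") = false := by simp [hAND]
        rw [pvLoopA, hx]
        simp only [Bool.false_eq_true, if_false]
        rw [ih]
        by_cases hd : PySem.Chars.strIsdigit x.toList = true <;>
        cases found <;>
        cases h : PySem.List.index? xs "AND" <;>
        simp [hd, List.take_succ_cons, Prod.ext_iff] <;>
        omega

-- pvFirstDigit as a find? over the list
theorem pvFirstDigit_eq_find (xs : List String) :
    pvFirstDigit xs =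
      match xs.find? PySem.Str.strIsdigit with
      | some x => PySem.Int.ofStr? x
      | none => none := by
  induction xs with
  | nil => simp [pvFirstDigit]
  | cons x xs ih =>
      by_cases hd : PySem.Chars.strIsdigit x.toList = true <;>
      simp [pvFirstDigit, hd, ih]

-- ===== VERDICT (by name: the statement is the Claim_ definition above) =====
theorem get_outsplits_word_info_spec : Claim_equal_get_outsplits_word_info := by
  intro outsplits _
  unfold Spec_get_outsplits_word_info
  unfold get_outsplits_word_info get_outsplits_word_info_alt
  rw [pvLoopA_char]
  cases h : PySem.List.index? outsplits "AND" with
  | none => simp [pvFirstDigit_eq_find]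
  | some k =>
      have hslice : PySem.List.slice outsplits none (some (((k : Int) + 1) - 1)) =
          outsplits.take k := by
        have he : ((k : Int) + 1) - 1 = (k : Int) := by ring
        rw [he, PySem.List.slice_to_natCast]
      simp only [hslice, pvFirstDigit_eq_find, Prod.ext_iff]
      simp
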